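-- pv_equiv track=rewrite | github.com/xu-kj/leetcode.python | interviews/2023_10_23 Meta Code Puzzle/l1/q3/v2.py | getMaximumEatenDishCount
-- ===== SOURCE A (Python) =====
-- from typing import List
--
-- def getMaximumEatenDishCount(N: int, D: List[int], K: int) -> int:
--     assert N == len(D)
--
--     eaten = []
--     eaten_ = set()
--
--     for d in D:
--         if d not in eaten_:
--             eaten.append(d)
--             eaten_.add(d)
--             if len(eaten) > K:
--                 eaten_.remove(eaten[-K - 1])
--
--     return len(eaten)
-- ===== SOURCE B (Python) =====
-- from typing import List
--
-- def getMaximumEatenDishCount(N: int, D: List[int], K: int) -> int: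
--     assert N == len(D)
--
--     count = 0
--     last = {}
--
--     for d in D:
--         if d not in last or count - last[d] >= K:
--             count += 1
--             last[d] = count
--
--     return count
-- ===== Notes on version B (the rewrite author's own statement) =====
-- stated objective: idiomatic
-- what changed: Replaces the explicit eaten-history list plus sliding-window membership set (with per-step eviction of eaten[-K-1]) by a single counter and a dict mapping each dish to the count at which it was last eaten; a dish is eaten iff it was never eaten or at least K dishes were eaten since, so the window list and its eviction step disappear.
-- outside the precondition, e.g. on getMaximumEatenDishCount(1, [5], -1): A returns 1, B returns 1
import Mathlib
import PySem

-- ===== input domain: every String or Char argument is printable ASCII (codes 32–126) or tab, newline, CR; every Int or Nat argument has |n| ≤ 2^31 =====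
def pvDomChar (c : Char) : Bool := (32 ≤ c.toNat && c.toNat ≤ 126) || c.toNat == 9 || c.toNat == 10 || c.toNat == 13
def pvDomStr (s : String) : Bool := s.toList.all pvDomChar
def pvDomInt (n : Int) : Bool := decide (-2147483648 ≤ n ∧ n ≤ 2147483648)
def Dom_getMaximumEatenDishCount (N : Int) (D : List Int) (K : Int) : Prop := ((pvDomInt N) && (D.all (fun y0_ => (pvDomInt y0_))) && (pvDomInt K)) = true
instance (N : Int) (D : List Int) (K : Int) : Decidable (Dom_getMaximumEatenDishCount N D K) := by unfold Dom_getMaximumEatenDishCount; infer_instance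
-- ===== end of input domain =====

-- B replaces A's history list + sliding-window set (with eviction) by a counter and a
-- last-eaten-count dict (idiomatic; same O(n) cost). Equivalence is proved on Pre_ below.


-- ===== PORT A =====
-- 'assert N == len(D)' raises AssertionError when N ≠ len(D); Pre_ excludes those inputs, so the
-- port omits the assert. The eviction step 'eaten_.remove(eaten[-K - 1])' is ported exactly:
-- pyGet? = none is Python's IndexError and remove? = none its KeyError (both only reachable with
-- K < 0, which Pre_ excludes); the port keeps the state unchanged there.
def pvStepA (K : Int) (st : List Int × PySem.Set Int) (d : Int) : List Int × PySem.Set Int :=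
  if PySem.Set.contains st.2 d then st
  else
    let eaten := st.1 ++ [d]
    let es := PySem.Set.add st.2 d
    if (eaten.length : Int) > K then
      match PySem.List.pyGet? eaten (-K - 1) with
      | some v => (eaten, (PySem.Set.remove? es v).getD es)
      | none => (eaten, es)
    else (eaten, es)

def getMaximumEatenDishCount (N : Int) (D : List Int) (K : Int) : Int :=
  ((D.foldl (pvStepA K) ([], PySem.Set.empty)).1.length : Int)

-- ===== PORT B =====
-- B: count of dishes eaten and a dict 'last' with the count at which each dish was last eaten;
-- eat iff never eaten or at least K dishes eaten since ('d not in last or count - last[d] >= K').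
def pvStepB (K : Int) (st : Int × PySem.Dict Int Int) (d : Int) : Int × PySem.Dict Int Int :=
  let eat : Bool :=
    match PySem.Dict.get? st.2 d with
    | none => true
    | some p => decide (st.1 - p ≥ K)
  if eat then (st.1 + 1, PySem.Dict.insert st.2 d (st.1 + 1)) else st

def getMaximumEatenDishCount_alt (N : Int) (D : List Int) (K : Int) : Int :=
  (D.foldl (pvStepB K) (0, PySem.Dict.empty)).1

-- ===== PRECONDITION & SPEC =====
-- Pre_ excludes N ≠ len(D), where A's assert raises AssertionError (B asserts identically), and
-- K < 0, where A's eviction 'eaten_.remove(eaten[-K - 1])' raises IndexError/KeyError on all but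
-- degenerate inputs (on the few such inputs where A still returns, e.g. (1, [5], -1), it is excluded anyway).
def Pre_getMaximumEatenDishCount (N : Int) (D : List Int) (K : Int) : Prop :=
  N = (D.length : Int) ∧ 0 ≤ K
instance (N : Int) (D : List Int) (K : Int) : Decidable (Pre_getMaximumEatenDishCount N D K) := by
  unfold Pre_getMaximumEatenDishCount; infer_instance

def pvWitness_getMaximumEatenDishCount : Int × List Int × Int := (3, ([1, 2, 1], 2))

def Spec_getMaximumEatenDishCount (N : Int) (D : List Int) (K : Int) (out : Int) : Prop := out = getMaximumEatenDishCount_alt N D K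
instance (N : Int) (D : List Int) (K : Int) (out : Int) : Decidable (Spec_getMaximumEatenDishCount N D K out) := by unfold Spec_getMaximumEatenDishCount; infer_instance

-- ===== CLAIM (what is proved, stated in full; the proofs are below) =====
def Claim_equal_getMaximumEatenDishCount : Prop := ∀ (N : Int) (D : List Int) (K : Int), Dom_getMaximumEatenDishCount N D K → Pre_getMaximumEatenDishCount N D K → Spec_getMaximumEatenDishCount N D K (getMaximumEatenDishCount N D K)

-- ===== LEMMAS AND PROOFS =====

-- index of the LAST occurrence of x in a list
def pvLastIdx? (x : Int) : List Int → Option Nat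
  | [] => none
  | a :: t =>
    match pvLastIdx? x t with
    | some i => some (i + 1)
    | none => if a = x then some 0 else none

-- 'x is among the last K eaten dishes' (both programs' eating condition, stated on the history)
def pvInWin (K : Int) (eaten : List Int) (x : Int) : Bool :=
  match pvLastIdx? x eaten with
  | none => false
  | some i => decide ((eaten.length : Int) - ((i : Int) + 1) < K)

-- common reference step: the eaten-history after one dish
def pvRef (K : Int) (eaten : List Int) (d : Int) : List Int :=
  if pvInWin K eaten d then eaten else eaten ++ [d]

lemma pvLastIdx?_append (x y : Int) (l : List Int) :
    pvLastIdx? x (l ++ [y]) = if y = x then some l.length else pvLastIdx? x l := by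
  induction l with
  | nil => simp [pvLastIdx?]
  | cons a t ih =>
    simp only [List.cons_append, pvLastIdx?, ih]
    by_cases hyx : y = x
    · simp [hyx]
    · simp [hyx]

lemma pvLastIdx?_getElem {x : Int} {l : List Int} {i : Nat} (h : pvLastIdx? x l = some i) :
    ∃ hi : i < l.length, l[i] = x := by
  induction l generalizing i with
  | nil => simp [pvLastIdx?] at h
  | cons a t ih =>
    simp only [pvLastIdx?] at h
    rcases ht : pvLastIdx? x t with _ | j
    · rw [ht] at h
      by_cases hax : a = x
      · simp [hax] at h
        subst h
        exact ⟨by simp, hax⟩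
      · simp [hax] at h
    · rw [ht] at h
      simp at h
      obtain ⟨hj, hje⟩ := ih ht
      subst h
      exact ⟨by simpa using hj, by simpa using hje⟩

lemma pvLastIdx?_ge {x : Int} {l : List Int} {j : Nat} (hj : j < l.length) (hx : l[j] = x) :
    ∃ i, pvLastIdx? x l = some i ∧ j ≤ i := by
  induction l generalizing j with
  | nil => simp at hj
  | cons a t ih =>
    match j with
    | 0 =>
      simp at hx
      rcases ht : pvLastIdx? x t with _ | i
      · exact ⟨0, by simp [pvLastIdx?, ht, hx], Nat.le_refl 0⟩
      · exact ⟨i + 1, by simp [pvLastIdx?, ht], Nat.zero_le _⟩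
    | k + 1 =>
      have hk : k < t.length := by simpa using hj
      have hxk : t[k] = x := by simpa using hx
      obtain ⟨i, hi, hki⟩ := ih hk hxk
      exact ⟨i + 1, by simp [pvLastIdx?, hi], by omega⟩

def pvInvA (K : Int) (eaten : List Int) (es : PySem.Set Int) : Prop :=
  es.Nodup ∧ ∀ x, x ∈ es ↔ pvInWin K eaten x = true

def pvSpaced (K : Int) (eaten : List Int) : Prop :=
  ∀ i j, (hi : i < eaten.length) → (hj : j < eaten.length) → i < j → eaten[i] = eaten[j] →
    (j : Int) - (i : Int) ≥ K + 1

def pvInvB (eaten : List Int) (st : Int × PySem.Dict Int Int) : Prop :=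
  st.1 = (eaten.length : Int) ∧
  ∀ x, PySem.Dict.get? st.2 x = (pvLastIdx? x eaten).map (fun i => ((i : Int) + 1))

lemma pvStepA_spec (K : Int) (hK : 0 ≤ K) (eaten : List Int) (es : PySem.Set Int) (d : Int)
    (hA : pvInvA K eaten es) (hS : pvSpaced K eaten) :
    (pvStepA K (eaten, es) d).1 = pvRef K eaten d ∧
    pvInvA K (pvRef K eaten d) (pvStepA K (eaten, es) d).2 ∧
    pvSpaced K (pvRef K eaten d) := by
  obtain ⟨hnd, hmem⟩ := hA
  have hcont : PySem.Set.contains es d = pvInWin K eaten d := by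
    by_cases h : pvInWin K eaten d = true
    · rw [h]
      exact (PySem.Set.contains_iff _ _).2 ((hmem d).2 h)
    · simp only [Bool.not_eq_true] at h
      rw [h]
      cases hc : PySem.Set.contains es d
      · rfl
      · exact absurd ((hmem d).1 ((PySem.Set.contains_iff _ _).1 hc)) (by simp [h])
  by_cases hw : pvInWin K eaten d = true
  · unfold pvStepA pvRef
    simp only [hcont, hw, if_true]
    exact ⟨trivial, ⟨hnd, hmem⟩, hS⟩
  · simp only [Bool.not_eq_true] at hw
    have hfar : ∀ i, pvLastIdx? d eaten = some i → (eaten.length : Int) - ((i : Int) + 1) ≥ K := by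
      intro i hi
      unfold pvInWin at hw
      rw [hi] at hw
      simp at hw
      omega
    have hS' : pvSpaced K (eaten ++ [d]) := by
      intro i j hi hj hij hEq
      by_cases hjn : j < eaten.length
      · have hi' : i < eaten.length := lt_trans hij hjn
        rw [List.getElem_append_left hi', List.getElem_append_left hjn] at hEq
        exact hS i j hi' hjn hij hEq
      · have hj' : j = eaten.length := by
          simp only [List.length_append, List.length_cons, List.length_nil] at hj
          omega
        subst hj'
        have hi' : i < eaten.length := hij
        have hxi : eaten[i] = d := by
          rw [List.getElem_append_left hi'] at hEq
          simpa using hEq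
        obtain ⟨i0, hi0, hii0⟩ := pvLastIdx?_ge hi' hxi
        have := hfar i0 hi0
        omega
    have hwinApp : ∀ x, pvInWin K (eaten ++ [d]) x =
        (if d = x then decide (0 < K) else
          match pvLastIdx? x eaten with
          | none => false
          | some i => decide (((eaten.length : Int) + 1) - ((i : Int) + 1) < K)) := by
      intro x
      unfold pvInWin
      rw [pvLastIdx?_append]
      by_cases hdx : d = x
      · simp only [hdx, if_true, List.length_append, List.length_cons, List.length_nil]
        simp only [decide_eq_decide]
        push_cast
        omega
      · simp only [hdx, if_false]
        rcases h : pvLastIdx? x eaten with _ | i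
        · rfl
        · simp only [List.length_append, List.length_cons, List.length_nil]
          simp only [decide_eq_decide]
          push_cast
          omega
    unfold pvStepA pvRef
    simp only [hcont, hw, Bool.false_eq_true, if_false]
    refine ⟨?_, ?_, hS'⟩
    · split
      · rcases PySem.List.pyGet? (eaten ++ [d]) (-K - 1) with _ | v <;> rfl
      · rfl
    · have hKK : (K.toNat : Int) = K := Int.toNat_of_nonneg hK
      by_cases hlen : ((eaten ++ [d]).length : Int) > K
      · -- eviction branch
        rw [if_pos hlen]
        have hKn : K.toNat ≤ eaten.length := by
          simp only [List.length_append, List.length_cons, List.length_nil] at hlen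
          omega
        set j := eaten.length - K.toNat with hjdef
        have hjle : j ≤ eaten.length := by omega
        have hjint : (j : Int) = (eaten.length : Int) - K := by
          rw [hjdef]
          push_cast [hKn]
          omega
        have hjlt : j < (eaten ++ [d]).length := by
          simp only [List.length_append, List.length_cons, List.length_nil]
          omega
        have hget : PySem.List.pyGet? (eaten ++ [d]) (-K - 1) = some ((eaten ++ [d])[j]'hjlt) := by
          simp only [PySem.List.pyGet?, PySem.List.pyIdx?, List.length_append, List.length_cons,
            List.length_nil]
          have h1 : ¬(0 ≤ -K - 1) := by omega
          have h2 : -((eaten.length + 1 : Nat) : Int) ≤ -K - 1 := by push_cast; omega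
          rw [if_neg h1, if_pos h2]
          have h3 : eaten.length + 1 - (-(-K - 1)).toNat = j := by omega
          rw [h3]
          simp [List.getElem?_eq_getElem hjlt]
        rw [hget]
        set v := (eaten ++ [d])[j]'hjlt with hveq
        show pvInvA K (eaten ++ [d]) (((PySem.Set.add es d).remove? v).getD (PySem.Set.add es d))
        have hvmem : v ∈ PySem.Set.add es d := by
          rcases Nat.lt_or_ge j eaten.length with hjl | hjg
          · have hv : v = eaten[j]'hjl := by rw [hveq]; exact List.getElem_append_left hjl
            obtain ⟨i, hi, hji⟩ := pvLastIdx?_ge hjl hv.symm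
            have hwin : pvInWin K eaten v = true := by
              unfold pvInWin
              rw [hi]
              simp only [decide_eq_true_iff]
              omega
            exact (PySem.Set.mem_add _ _ _).2 (Or.inl ((hmem v).2 hwin))
          · have hje : j = eaten.length := by omega
            have hv : v = d := by rw [hveq]; simp [hje]
            exact (PySem.Set.mem_add _ _ _).2 (Or.inr hv)
        rw [PySem.Set.remove?_of_mem hvmem, Option.getD_some]
        refine ⟨PySem.Set.nodup_discard _ _ (PySem.Set.nodup_add _ _ hnd), ?_⟩
        intro x
        rw [PySem.Set.mem_discard, PySem.Set.mem_add, hwinApp x]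
        by_cases hdx : d = x
        · rw [if_pos hdx]
          simp only [decide_eq_true_iff]
          constructor
          · rintro ⟨-, hdv⟩
            by_contra hk0
            have hj0 : j = eaten.length := by omega
            have hvd : v = d := by rw [hveq]; simp [hj0]
            exact hdv (hvd.trans hdx).symm
          · intro hKpos
            refine ⟨Or.inr hdx.symm, ?_⟩
            intro hdv
            have hjlen : j < eaten.length := by omega
            have hvj : v = eaten[j]'hjlen := by rw [hveq]; exact List.getElem_append_left hjlen
            have hjd : eaten[j]'hjlen = d := by rw [← hvj, ← hdv, hdx]
            obtain ⟨i0, hi0, hji0⟩ := pvLastIdx?_ge hjlen hjd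
            have := hfar i0 hi0
            omega
        · rw [if_neg hdx]
          have hxd : x ≠ d := fun h => hdx h.symm
          rcases hLx : pvLastIdx? x eaten with _ | i
          · have hxes : x ∉ es := by
              intro hx
              have := (hmem x).1 hx
              unfold pvInWin at this
              rw [hLx] at this
              simp at this
            simp only [Bool.false_eq_true, iff_false]
            rintro ⟨hor, -⟩
            rcases hor with h | h
            · exact hxes h
            · exact hxd h
          · simp only [decide_eq_true_iff]
            have hx_es : x ∈ es ↔ (eaten.length : Int) - ((i : Int) + 1) < K := by
              rw [hmem x]
              unfold pvInWin
              rw [hLx]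
              simp
            obtain ⟨hi_lt, hi_elem⟩ := pvLastIdx?_getElem hLx
            constructor
            · rintro ⟨hor, hxv⟩
              have hiK : (eaten.length : Int) - ((i : Int) + 1) < K := by
                rcases hor with h | h
                · exact hx_es.1 h
                · exact absurd h hxd
              by_contra hcon
              have hijn : i = j := by omega
              apply hxv
              rw [hveq]
              subst hijn
              rw [List.getElem_append_left hi_lt]
              exact hi_elem.symm
            · intro hiK
              refine ⟨Or.inl (hx_es.2 (by omega)), ?_⟩
              intro hxv
              by_cases hjlen : j < eaten.length
              · have hvj : v = eaten[j]'hjlen := by rw [hveq]; exact List.getElem_append_left hjlen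
                have hj_lt_i : j < i := by omega
                have heq2 : eaten[j]'hjlen = eaten[i]'hi_lt := by rw [← hvj, ← hxv, hi_elem]
                have := hS j i hjlen hi_lt hj_lt_i heq2
                omega
              · have hj0 : j = eaten.length := by omega
                have hvd : v = d := by rw [hveq]; simp [hj0]
                exact hxd (hxv.trans hvd)
      · -- no eviction
        rw [if_neg hlen]
        have hlen2 : (eaten.length : Int) + 1 ≤ K := by
          simp only [List.length_append, List.length_cons, List.length_nil] at hlen
          push_cast at hlen
          omega
        refine ⟨PySem.Set.nodup_add _ _ hnd, ?_⟩
        intro x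
        rw [PySem.Set.mem_add, hwinApp x]
        by_cases hdx : d = x
        · rw [if_pos hdx]
          simp only [decide_eq_true_iff]
          exact ⟨fun _ => by omega, fun _ => Or.inr hdx.symm⟩
        · rw [if_neg hdx]
          have hxd : x ≠ d := fun h => hdx h.symm
          rcases hLx : pvLastIdx? x eaten with _ | i
          · have hxes : x ∉ es := by
              intro hx
              have := (hmem x).1 hx
              unfold pvInWin at this
              rw [hLx] at this
              simp at this
            simp only [Bool.false_eq_true, iff_false]
            rintro (h | h)
            · exact hxes h
            · exact hxd h
          · simp only [decide_eq_true_iff]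
            have hx_es : x ∈ es := by
              rw [hmem x]
              unfold pvInWin
              rw [hLx]
              simp only [decide_eq_true_iff]
              omega
            exact ⟨fun _ => by omega, fun _ => Or.inl hx_es⟩

lemma pvStepB_spec (K : Int) (eaten : List Int) (st : Int × PySem.Dict Int Int) (d : Int)
    (hB : pvInvB eaten st) : pvInvB (pvRef K eaten d) (pvStepB K st d) := by
  obtain ⟨c, dct⟩ := st
  obtain ⟨hc, hg⟩ := hB
  simp only at hc hg
  have hcond : pvStepB K (c, dct) d =
      if pvInWin K eaten d then (c, dct) else (c + 1, PySem.Dict.insert dct d (c + 1)) := by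
    unfold pvStepB pvInWin
    simp only [hg d]
    rcases h : pvLastIdx? d eaten with _ | i
    · simp
    · simp only [hc]
      by_cases hlt : ((eaten.length : Int)) - ((i : Int) + 1) < K
      · have h2 : ¬((eaten.length : Int) - ((i : Int) + 1) ≥ K) := by omega
        simp [hlt, h2]
      · have h2 : (eaten.length : Int) - ((i : Int) + 1) ≥ K := by omega
        simp [hlt, h2]
  rw [hcond]
  unfold pvRef
  by_cases hw : pvInWin K eaten d = true
  · simp only [hw, if_true]
    exact ⟨hc, hg⟩
  · simp only [Bool.not_eq_true] at hw
    simp only [hw, Bool.false_eq_true, if_false]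
    constructor
    · simp only [List.length_append, List.length_cons, List.length_nil]
      push_cast
      omega
    · intro x
      rw [PySem.Dict.get?_insert, pvLastIdx?_append]
      by_cases hxd : x = d
      · simp [hxd, hc]
      · have hdx : ¬(d = x) := fun h => hxd h.symm
        simp only [hxd, if_false, hdx]
        exact hg x

lemma pvFoldA (K : Int) (hK : 0 ≤ K) :
    ∀ (xs : List Int) (eaten : List Int) (es : PySem.Set Int),
      pvInvA K eaten es → pvSpaced K eaten →
      (xs.foldl (pvStepA K) (eaten, es)).1 = xs.foldl (pvRef K) eaten := by
  intro xs
  induction xs with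
  | nil => intro eaten es _ _; rfl
  | cons x xs ih =>
    intro eaten es hA hS
    have h := pvStepA_spec K hK eaten es x hA hS
    have hpair : pvStepA K (eaten, es) x = (pvRef K eaten x, (pvStepA K (eaten, es) x).2) := by
      rw [← h.1]
    simp only [List.foldl_cons]
    rw [hpair]
    exact ih (pvRef K eaten x) _ h.2.1 h.2.2

lemma pvFoldB (K : Int) :
    ∀ (xs : List Int) (eaten : List Int) (st : Int × PySem.Dict Int Int),
      pvInvB eaten st →
      (xs.foldl (pvStepB K) st).1 = ((xs.foldl (pvRef K) eaten).length : Int) := by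
  intro xs
  induction xs with
  | nil => intro eaten st hB; exact hB.1
  | cons x xs ih =>
    intro eaten st hB
    simp only [List.foldl_cons]
    exact ih (pvRef K eaten x) _ (pvStepB_spec K eaten st x hB)

-- ===== VERDICT (by name: the statement is the Claim_ definition above) =====
theorem getMaximumEatenDishCount_spec : Claim_equal_getMaximumEatenDishCount := by
  intro N D K _hDom hPre
  unfold Spec_getMaximumEatenDishCount getMaximumEatenDishCount getMaximumEatenDishCount_alt
  have hA0 : pvInvA K [] PySem.Set.empty := by
    refine ⟨List.nodup_nil, ?_⟩
    intro x
    simp [PySem.Set.empty, pvInWin, pvLastIdx?]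
  have hS0 : pvSpaced K [] := by intro i j hi; simp at hi
  have hB0 : pvInvB [] (0, PySem.Dict.empty) := by
    refine ⟨rfl, ?_⟩
    intro x
    simp [pvLastIdx?, PySem.Dict.get?_empty]
  rw [pvFoldA K hPre.2 D [] PySem.Set.empty hA0 hS0, pvFoldB K D [] _ hB0]
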